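-- pv_equiv track=rewrite | github.com/daniel-reich/ubiquitous-fiesta | Fx7hyoNTZNMGzc3uj_20.py | number_len_sort
-- ===== SOURCE A (Python) =====
-- def number_len_sort(lst):
--   A=[]
--   for n in range(len(lst)):
--     a = int(lst[n])
--     if a < 10:
--       A.append(a)
--   for n in range(len(lst)):
--     a = int(lst[n])
--     if a < 100 and a >=10:
--       A.append(a)
--   for n in range(len(lst)):
--     a = int(lst[n])
--     if a < 1000 and a >=100:
--       A.append(a)
--   for n in range(len(lst)):
--     a = int(lst[n])
--     if a < 10000 and a >=1000:
--       A.append(a)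
--   return A
-- ===== SOURCE B (Python) =====
-- def number_len_sort(lst):
--   b0, b1, b2, b3 = [], [], [], []
--   for x in lst:
--     a = int(x)
--     if a < 10:
--       b0.append(a)
--     elif a < 100:
--       b1.append(a)
--     elif a < 1000:
--       b2.append(a)
--     elif a < 10000:
--       b3.append(a)
--   return b0 + b1 + b2 + b3
-- ===== Notes on version B (the rewrite author's own statement) =====
-- stated objective: faster
-- what changed: Replaces A's four full scans of the list (one per digit-count band) with a single pass that routes each element into one of four buckets via an if/elif chain, then concatenates the buckets.
import Mathlib
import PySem

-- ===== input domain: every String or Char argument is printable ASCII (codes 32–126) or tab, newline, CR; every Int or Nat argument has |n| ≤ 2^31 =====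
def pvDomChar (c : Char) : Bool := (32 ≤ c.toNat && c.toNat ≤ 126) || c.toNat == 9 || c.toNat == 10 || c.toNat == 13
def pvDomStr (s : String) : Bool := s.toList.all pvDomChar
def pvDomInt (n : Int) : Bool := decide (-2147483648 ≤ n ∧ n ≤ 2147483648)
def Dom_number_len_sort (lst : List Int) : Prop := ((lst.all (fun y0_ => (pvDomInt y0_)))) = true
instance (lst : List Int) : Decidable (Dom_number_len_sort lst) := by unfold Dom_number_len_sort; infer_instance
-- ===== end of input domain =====

-- B replaces A's four full scans (one per digit-count band) with a single pass into four
-- buckets, concatenated at the end: one traversal instead of four.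


-- ===== PORT A =====
-- A: four successive loops over the list, each appending the elements of one band.
def number_len_sort (lst : List Int) : List Int :=
  let A1 := lst.foldl (fun A a => if a < 10 then A ++ [a] else A) []
  let A2 := lst.foldl (fun A a => if a < 100 ∧ a ≥ 10 then A ++ [a] else A) A1
  let A3 := lst.foldl (fun A a => if a < 1000 ∧ a ≥ 100 then A ++ [a] else A) A2
  lst.foldl (fun A a => if a < 10000 ∧ a ≥ 1000 then A ++ [a] else A) A3

-- ===== PORT B =====
-- B: one pass routing each element into one of four buckets via an if/elif chain.
def number_len_sort_alt (lst : List Int) : List Int :=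
  let s := lst.foldl (fun (b : List Int × List Int × List Int × List Int) a =>
      if a < 10 then (b.1 ++ [a], b.2.1, b.2.2.1, b.2.2.2)
      else if a < 100 then (b.1, b.2.1 ++ [a], b.2.2.1, b.2.2.2)
      else if a < 1000 then (b.1, b.2.1, b.2.2.1 ++ [a], b.2.2.2)
      else if a < 10000 then (b.1, b.2.1, b.2.2.1, b.2.2.2 ++ [a])
      else b) ([], [], [], [])
  s.1 ++ s.2.1 ++ s.2.2.1 ++ s.2.2.2

-- ===== PRECONDITION & SPEC =====
def Spec_number_len_sort (lst : List Int) (out : List Int) : Prop := out = number_len_sort_alt lst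
instance (lst : List Int) (out : List Int) : Decidable (Spec_number_len_sort lst out) := by unfold Spec_number_len_sort; infer_instance

-- ===== CLAIM (what is proved, stated in full; the proofs are below) =====
def Claim_equal_number_len_sort : Prop := ∀ (lst : List Int), Dom_number_len_sort lst → Spec_number_len_sort lst (number_len_sort lst)

-- ===== LEMMAS AND PROOFS =====

-- A single filtering loop equals acc ++ filter.
theorem foldl_filter_band (p : Int → Prop) [DecidablePred p] (lst acc : List Int) :
    lst.foldl (fun A a => if p a then A ++ [a] else A) acc = acc ++ lst.filter (fun a => decide (p a)) := by
  induction lst generalizing acc with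
  | nil => simp
  | cons x xs ih =>
    simp only [List.foldl_cons, List.filter_cons]
    by_cases h : p x <;> simp [h, ih]

-- B's single pass computes the four filters in its four buckets.
theorem alt_fold_eq (lst : List Int) (b0 b1 b2 b3 : List Int) :
    lst.foldl (fun (b : List Int × List Int × List Int × List Int) a =>
      if a < 10 then (b.1 ++ [a], b.2.1, b.2.2.1, b.2.2.2)
      else if a < 100 then (b.1, b.2.1 ++ [a], b.2.2.1, b.2.2.2)
      else if a < 1000 then (b.1, b.2.1, b.2.2.1 ++ [a], b.2.2.2)
      else if a < 10000 then (b.1, b.2.1, b.2.2.1, b.2.2.2 ++ [a])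
      else b) (b0, b1, b2, b3) =
    (b0 ++ lst.filter (fun a => decide (a < 10)),
     b1 ++ lst.filter (fun a => decide (a < 100 ∧ a ≥ 10)),
     b2 ++ lst.filter (fun a => decide (a < 1000 ∧ a ≥ 100)),
     b3 ++ lst.filter (fun a => decide (a < 10000 ∧ a ≥ 1000))) := by
  induction lst generalizing b0 b1 b2 b3 with
  | nil => simp
  | cons x xs ih =>
    simp only [List.foldl_cons, List.filter_cons]
    by_cases h0 : x < 10
    · simp [h0, ih] <;> omega
    · by_cases h1 : x < 100
      · simp [h0, h1, ih, (by omega : x < 100 ∧ x ≥ 10)] <;> omega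
      · by_cases h2 : x < 1000
        · simp [h0, h1, h2, ih, (by omega : x < 1000 ∧ x ≥ 100)] <;> omega
        · by_cases h3 : x < 10000
          · simp [h0, h1, h2, h3, ih, (by omega : x < 10000 ∧ x ≥ 1000)] <;> omega
          · simp [h0, h1, h2, h3, ih] <;> omega

-- ===== VERDICT (by name: the statement is the Claim_ definition above) =====
theorem number_len_sort_spec : Claim_equal_number_len_sort := by
  intro lst _
  unfold Spec_number_len_sort number_len_sort number_len_sort_alt
  rw [alt_fold_eq]
  simp only [foldl_filter_band]
  simp
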